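-- pv_equiv track=rewrite | github.com/mk7sub/test-scenario-agent | source/generate_dataset.py | make_normal_logs
-- ===== SOURCE A (Python) =====
-- from typing import List, Tuple
--
-- def make_normal_logs(target_lines: int, case_prefix: str) -> List[str]:
--     lines: List[str] = []
--     order_id = 1
--     ts_base = "2026-02-05 10:00:00"
--
--     while len(lines) < target_lines:
--         lines.append(f"{ts_base} INFO order={case_prefix}-{order_id} status=受付済み message=受付完了")
--         if len(lines) >= target_lines:
--             break
--         lines.append(f"{ts_base} INFO order={case_prefix}-{order_id} status=仕掛中 message=調理開始")
--         if len(lines) >= target_lines: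
--             break
--         lines.append(f"{ts_base} INFO order={case_prefix}-{order_id} status=完了 message=調理完了・呼び出し")
--         if len(lines) >= target_lines:
--             break
--         order_id += 1
--
--     return lines[:target_lines]
-- ===== SOURCE B (Python) =====
-- from typing import List, Tuple
--
-- def make_normal_logs(target_lines: int, case_prefix: str) -> List[str]:
--     ts_base = "2026-02-05 10:00:00"
--     table: List[Tuple[str, str]] = [
--         ("受付済み", "受付完了"),
--         ("仕掛中", "調理開始"),
--         ("完了", "調理完了・呼び出し"),
--     ]
--     result: List[str] = []
--     for i in range(target_lines):
--         status, message = table[i % 3]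
--         result.append(f"{ts_base} INFO order={case_prefix}-{i // 3 + 1} status={status} message={message}")
--     return result
-- ===== Notes on version B (the rewrite author's own statement) =====
-- stated objective: simpler
-- what changed: Replaces the while loop with three interleaved length checks, breaks and a manually incremented order_id by a single for-loop over range(target_lines) that derives order_id as i//3+1 and looks up (status, message) in a fixed 3-entry table at i%3; no intermediate over-building or final slice needed.
import Mathlib
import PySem

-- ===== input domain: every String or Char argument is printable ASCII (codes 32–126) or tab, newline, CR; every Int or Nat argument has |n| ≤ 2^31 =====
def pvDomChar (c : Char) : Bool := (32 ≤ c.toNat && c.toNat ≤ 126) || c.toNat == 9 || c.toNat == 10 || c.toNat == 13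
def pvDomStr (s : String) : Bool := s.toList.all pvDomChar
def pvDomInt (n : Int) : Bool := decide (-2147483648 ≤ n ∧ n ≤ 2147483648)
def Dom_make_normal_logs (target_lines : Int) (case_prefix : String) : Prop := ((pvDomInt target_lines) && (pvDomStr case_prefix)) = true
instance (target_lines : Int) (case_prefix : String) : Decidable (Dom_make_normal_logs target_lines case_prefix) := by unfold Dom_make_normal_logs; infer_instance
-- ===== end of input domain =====

-- B replaces A's while loop with interleaved length checks and a manual order_id counter
-- by one for-loop over range(target_lines) with a fixed (status, message) table indexed by i % 3 (objective: simpler).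

-- ===== PORT A =====
-- the while loop: each pass appends up to three lines, checking the length after each append
def make_normal_logs_loop (target_lines : Int) (case_prefix : String) (ts_base : String)
    (lines : List String) (order_id : Int) : List String :=
  if _h : (lines.length : Int) < target_lines then
    let l1 := lines ++ [ts_base ++ " INFO order=" ++ case_prefix ++ "-" ++ PySem.Int.toStr order_id ++ " status=受付済み message=受付完了"]
    if (l1.length : Int) ≥ target_lines then l1
    else
      let l2 := l1 ++ [ts_base ++ " INFO order=" ++ case_prefix ++ "-" ++ PySem.Int.toStr order_id ++ " status=仕掛中 message=調理開始"]
      if (l2.length : Int) ≥ target_lines then l2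
      else
        let l3 := l2 ++ [ts_base ++ " INFO order=" ++ case_prefix ++ "-" ++ PySem.Int.toStr order_id ++ " status=完了 message=調理完了・呼び出し"]
        if (l3.length : Int) ≥ target_lines then l3
        else make_normal_logs_loop target_lines case_prefix ts_base l3 (order_id + 1)
  else lines
termination_by (target_lines - lines.length).toNat
decreasing_by simp_all; omega

def make_normal_logs (target_lines : Int) (case_prefix : String) : List String :=
  PySem.List.slice (make_normal_logs_loop target_lines case_prefix "2026-02-05 10:00:00" [] 1) none (some target_lines)

-- ===== PORT B =====
def make_normal_logs_alt (target_lines : Int) (case_prefix : String) : List String :=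
  let ts_base := "2026-02-05 10:00:00"
  let table : List (String × String) :=
    [("受付済み", "受付完了"), ("仕掛中", "調理開始"), ("完了", "調理完了・呼び出し")]
  (PySem.List.pyRange 0 target_lines 1).foldl
    (fun result i =>
      let sm := (PySem.List.pyGet? table (PySem.Int.mod i 3)).getD ("", "")
      result ++ [ts_base ++ " INFO order=" ++ case_prefix ++ "-" ++ PySem.Int.toStr (PySem.Int.floordiv i 3 + 1) ++ " status=" ++ sm.1 ++ " message=" ++ sm.2])
    []

-- ===== PRECONDITION & SPEC =====
def Spec_make_normal_logs (target_lines : Int) (case_prefix : String) (out : List String) : Prop := out = make_normal_logs_alt target_lines case_prefix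
instance (target_lines : Int) (case_prefix : String) (out : List String) : Decidable (Spec_make_normal_logs target_lines case_prefix out) := by unfold Spec_make_normal_logs; infer_instance

-- ===== CLAIM (what is proved, stated in full; the proofs are below) =====
def Claim_equal_make_normal_logs : Prop := ∀ (target_lines : Int) (case_prefix : String), Dom_make_normal_logs target_lines case_prefix → Spec_make_normal_logs target_lines case_prefix (make_normal_logs target_lines case_prefix)

-- ===== LEMMAS AND PROOFS =====

-- the i-th generated line (i : Nat), shared characterisation used by both directions of the proof
def pvLine (case_prefix : String) (i : Nat) : String :=
  "2026-02-05 10:00:00" ++ " INFO order=" ++ case_prefix ++ "-" ++ PySem.Int.toStr (((i / 3 : Nat) : Int) + 1) ++ " status=" ++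
    (if i % 3 = 0 then "受付済み" else if i % 3 = 1 then "仕掛中" else "完了") ++ " message=" ++
    (if i % 3 = 0 then "受付完了" else if i % 3 = 1 then "調理開始" else "調理完了・呼び出し")

theorem pvLine_eq_body (p : String) (k : Nat) :
    pvLine p k =
      "2026-02-05 10:00:00" ++ " INFO order=" ++ p ++ "-" ++
        PySem.Int.toStr (PySem.Int.floordiv (k : Int) 3 + 1) ++ " status=" ++
        ((PySem.List.pyGet? [("受付済み", "受付完了"), ("仕掛中", "調理開始"), ("完了", "調理完了・呼び出し")] (PySem.Int.mod (k : Int) 3)).getD ("", "")).1 ++ " message=" ++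
        ((PySem.List.pyGet? [("受付済み", "受付完了"), ("仕掛中", "調理開始"), ("完了", "調理完了・呼び出し")] (PySem.Int.mod (k : Int) 3)).getD ("", "")).2 := by
  have hmod : PySem.Int.mod (k : Int) 3 = ((k % 3 : Nat) : Int) := by
    exact_mod_cast PySem.Int.mod_natCast k 3
  have hdiv : PySem.Int.floordiv (k : Int) 3 = ((k / 3 : Nat) : Int) := by
    exact_mod_cast PySem.Int.floordiv_natCast k 3
  rw [hmod, hdiv]
  have h3 : k % 3 = 0 ∨ k % 3 = 1 ∨ k % 3 = 2 := by omega
  rcases h3 with h | h | h <;> rw [h] <;>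
    simp [pvLine, h, PySem.List.pyGet?, PySem.List.pyIdx?]

theorem alt_eq_map (t : Int) (p : String) :
    make_normal_logs_alt t p = (List.range t.toNat).map (pvLine p) := by
  have hr : PySem.List.pyRange 0 t 1 = (List.range t.toNat).map (fun k : Nat => (k : Int)) := by
    by_cases ht : 0 ≤ t
    · obtain ⟨n, rfl⟩ : ∃ n : Nat, t = (n : Int) := ⟨t.toNat, by omega⟩
      rw [Int.toNat_natCast]
      exact PySem.List.pyRange_zero_natCast n
    · have h1 : PySem.List.pyRange 0 t 1 = [] := by
        simp [PySem.List.pyRange]; omega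
      have h2 : t.toNat = 0 := by omega
      simp [h1, h2]
  unfold make_normal_logs_alt
  rw [hr, List.foldl_map, PySem.List.foldl_append_singleton_eq_map, List.nil_append]
  refine List.map_congr_left ?_
  intro k _
  exact (pvLine_eq_body p k).symm

theorem pvLine_at (p : String) (m j : Nat) (hj : j < 3) :
    pvLine p (3 * m + j) =
      "2026-02-05 10:00:00" ++ " INFO order=" ++ p ++ "-" ++ PySem.Int.toStr ((m : Int) + 1) ++
        (if j = 0 then " status=受付済み message=受付完了"
         else if j = 1 then " status=仕掛中 message=調理開始"
         else " status=完了 message=調理完了・呼び出し") := by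
  have hd : (3 * m + j) / 3 = m := by omega
  have hm : (3 * m + j) % 3 = j := by omega
  interval_cases j <;> simp only [pvLine, hd, hm] <;> norm_num <;>
    simp only [String.append_assoc] <;> repeat' congr 1

theorem loop_eq_map (t : Int) (p : String) (m : Nat) :
    make_normal_logs_loop t p "2026-02-05 10:00:00" ((List.range (3 * m)).map (pvLine p)) ((m : Int) + 1)
      = (List.range (max (3 * m) t.toNat)).map (pvLine p) := by
  suffices H : ∀ (fuel m : Nat), t.toNat - 3 * m ≤ fuel →
      make_normal_logs_loop t p "2026-02-05 10:00:00" ((List.range (3 * m)).map (pvLine p)) ((m : Int) + 1)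
        = (List.range (max (3 * m) t.toNat)).map (pvLine p) from H _ m le_rfl
  intro fuel
  induction fuel with
  | zero =>
      intro m hm
      rw [make_normal_logs_loop]
      have hlt : ¬ (((List.range (3 * m)).map (pvLine p)).length : Int) < t := by
        simp; omega
      rw [dif_neg hlt]
      have : max (3 * m) t.toNat = 3 * m := by omega
      rw [this]
  | succ fuel ih =>
      intro m hm
      rw [make_normal_logs_loop]
      by_cases hlt : (((List.range (3 * m)).map (pvLine p)).length : Int) < t
      · have hlt' : (3 * m : Int) < t := by simpa using hlt
        rw [dif_pos hlt]
        have p0 := pvLine_at p m 0 (by omega)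
        have p1 := pvLine_at p m 1 (by omega)
        have p2 := pvLine_at p m 2 (by omega)
        simp only [Nat.add_zero] at p0 p1 p2
        norm_num at p0 p1 p2
        have e1 : (List.range (3 * m)).map (pvLine p) ++
            ["2026-02-05 10:00:00" ++ " INFO order=" ++ p ++ "-" ++ PySem.Int.toStr ((m : Int) + 1) ++ " status=受付済み message=受付完了"]
            = (List.range (3 * m + 1)).map (pvLine p) := by
          conv_rhs => rw [List.range_succ, List.map_append, List.map_singleton]
          rw [p0]
        have e2 : (List.range (3 * m + 1)).map (pvLine p) ++
            ["2026-02-05 10:00:00" ++ " INFO order=" ++ p ++ "-" ++ PySem.Int.toStr ((m : Int) + 1) ++ " status=仕掛中 message=調理開始"]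
            = (List.range (3 * m + 1 + 1)).map (pvLine p) := by
          conv_rhs => rw [List.range_succ, List.map_append, List.map_singleton]
          rw [p1]
        have e3 : (List.range (3 * m + 1 + 1)).map (pvLine p) ++
            ["2026-02-05 10:00:00" ++ " INFO order=" ++ p ++ "-" ++ PySem.Int.toStr ((m : Int) + 1) ++ " status=完了 message=調理完了・呼び出し"]
            = (List.range (3 * m + 1 + 1 + 1)).map (pvLine p) := by
          conv_rhs => rw [List.range_succ, List.map_append, List.map_singleton]
          have h22 : 3 * m + 1 + 1 = 3 * m + 2 := by omega
          rw [h22, p2]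
        simp only [e1]
        by_cases h1 : (((List.range (3 * m + 1)).map (pvLine p)).length : Int) ≥ t
        · rw [if_pos h1]
          have : max (3 * m) t.toNat = 3 * m + 1 := by simp at h1; omega
          rw [this]
        · rw [if_neg h1]
          simp only [e2]
          by_cases h2 : (((List.range (3 * m + 1 + 1)).map (pvLine p)).length : Int) ≥ t
          · rw [if_pos h2]
            have : max (3 * m) t.toNat = 3 * m + 1 + 1 := by simp at h1 h2; omega
            rw [this]
          · rw [if_neg h2]
            simp only [e3]
            by_cases h3 : (((List.range (3 * m + 1 + 1 + 1)).map (pvLine p)).length : Int) ≥ t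
            · rw [if_pos h3]
              have : max (3 * m) t.toNat = 3 * m + 1 + 1 + 1 := by simp at h2 h3; omega
              rw [this]
            · rw [if_neg h3]
              have hs : 3 * m + 1 + 1 + 1 = 3 * (m + 1) := by omega
              have hc : ((m : Int) + 1) + 1 = (((m + 1 : Nat)) : Int) + 1 := by push_cast; ring
              rw [hs, hc, ih (m + 1) (by simp at h3; omega)]
              have : max (3 * (m + 1)) t.toNat = max (3 * m) t.toNat := by
                simp at h3; omega
              rw [this]
      · rw [dif_neg hlt]
        have : max (3 * m) t.toNat = 3 * m := by simp at hlt; omega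
        rw [this]

-- ===== VERDICT (by name: the statement is the Claim_ definition above) =====
theorem make_normal_logs_spec : Claim_equal_make_normal_logs := by
  intro t p _
  show _ = _
  rw [make_normal_logs, alt_eq_map]
  have h := loop_eq_map t p 0
  simp only [Nat.mul_zero, List.range_zero, List.map_nil] at h
  norm_num at h
  rw [h]
  by_cases ht : 0 ≤ t
  · rw [PySem.List.slice_to (hb := ht)]
    rw [List.take_of_length_le (by simp)]
  · have h2 : t.toNat = 0 := by omega
    rw [h2]
    simp [PySem.List.slice]
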